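-- pv_equiv track=rewrite | github.com/VadymMak/multi-ai-chat | backend/app/services/query_classifier.py | is_snake_case
-- ===== SOURCE A (Python) =====
-- def is_snake_case(query: str) -> bool:
--     """
--     Check if query is in snake_case.
--
--     snake_case typically indicates a function or variable name.
--
--     Examples:
--         "search_files" → True
--         "file_indexer" → True
--         "FileIndexer" → False
--     """
--     # Must be all lowercase with underscores
--     if not query:
--         return False
--
--     # Should contain at least one underscore
--     if "_" not in query:
--         return False
--
--     # All letters should be lowercase
--     letters = [c for c in query if c.isalpha()]
--     if not letters:
--         return False
--
--     return all(c.islower() for c in letters)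
-- ===== SOURCE B (Python) =====
-- def is_snake_case(query: str) -> bool:
--     # Single pass over the characters maintaining three flags.
--     has_underscore = False
--     has_letter = False
--     all_lower = True
--     for c in query:
--         if c == "_":
--             has_underscore = True
--         if c.isalpha():
--             has_letter = True
--             if not c.islower():
--                 all_lower = False
--     return bool(query) and has_underscore and has_letter and all_lower
-- ===== Notes on version B (the rewrite author's own statement) =====
-- stated objective: alternative
-- what changed: Replaces A's three separate scans (substring membership, letter-filtering comprehension, all() over the filtered letters) with one single pass over the characters maintaining has_underscore/has_letter/all_lower flags.
import Mathlib
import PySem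

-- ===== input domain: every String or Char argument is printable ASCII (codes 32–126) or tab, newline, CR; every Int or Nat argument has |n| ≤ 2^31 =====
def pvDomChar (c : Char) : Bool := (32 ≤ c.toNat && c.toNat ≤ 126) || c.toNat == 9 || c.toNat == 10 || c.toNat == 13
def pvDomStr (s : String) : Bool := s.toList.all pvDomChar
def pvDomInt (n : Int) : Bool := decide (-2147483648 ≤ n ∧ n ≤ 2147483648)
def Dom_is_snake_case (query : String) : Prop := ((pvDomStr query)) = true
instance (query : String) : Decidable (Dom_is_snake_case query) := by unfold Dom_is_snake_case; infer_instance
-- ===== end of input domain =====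

-- B merges A's three scans into one pass with flags; return value only, no side effects.

-- ===== PORT A =====
def is_snake_case (query : String) : Bool :=
  if query.toList = [] then false
  else if ¬ query.toList.contains '_' then false
  else
    let letters := query.toList.filter PySem.Chars.isalpha
    if letters = [] then false
    else letters.all PySem.Chars.islower

-- ===== PORT B =====
def is_snake_case_alt (query : String) : Bool :=
  let st := query.toList.foldl
    (fun (s : Bool × Bool × Bool) c =>
      ( s.1 || c == '_',
        s.2.1 || PySem.Chars.isalpha c,
        s.2.2 && (!(PySem.Chars.isalpha c) || PySem.Chars.islower c)))
    (false, false, true)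
  !query.toList.isEmpty && st.1 && st.2.1 && st.2.2

-- ===== PRECONDITION & SPEC =====
def Spec_is_snake_case (query : String) (out : Bool) : Prop := out = is_snake_case_alt query
instance (query : String) (out : Bool) : Decidable (Spec_is_snake_case query out) := by unfold Spec_is_snake_case; infer_instance

-- ===== CLAIM (what is proved, stated in full; the proofs are below) =====
def Claim_equal_is_snake_case : Prop := ∀ (query : String), Dom_is_snake_case query → Spec_is_snake_case query (is_snake_case query)

-- ===== LEMMAS AND PROOFS =====

theorem fold_flags (cs : List Char) (u l a : Bool) :
    cs.foldl (fun (s : Bool × Bool × Bool) c =>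
      ( s.1 || c == '_',
        s.2.1 || PySem.Chars.isalpha c,
        s.2.2 && (!(PySem.Chars.isalpha c) || PySem.Chars.islower c)))
      (u, l, a)
    = (u || cs.contains '_',
       l || cs.any PySem.Chars.isalpha,
       a && (cs.filter PySem.Chars.isalpha).all PySem.Chars.islower) := by
  induction cs generalizing u l a with
  | nil => simp
  | cons c cs ih =>
      simp only [List.foldl_cons, ih, List.contains_cons, List.any_cons, List.filter_cons]
      by_cases h : PySem.Chars.isalpha c = true <;>
        simp [h, Bool.or_assoc, Bool.and_assoc, BEq.comm]

theorem filter_nil_iff (cs : List Char) :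
    (cs.filter PySem.Chars.isalpha = []) ↔ cs.any PySem.Chars.isalpha = false := by
  simp [List.filter_eq_nil_iff, List.any_eq_false]

theorem is_snake_case_eq (query : String) : is_snake_case query = is_snake_case_alt query := by
  unfold is_snake_case is_snake_case_alt
  rw [fold_flags]
  cases hcs : query.toList with
  | nil => simp
  | cons c cs =>
      simp only [Bool.false_or, List.isEmpty_cons, Bool.not_false, Bool.true_and]
      by_cases hu : (c :: cs).contains '_' = true
      · by_cases hl : (c :: cs).any PySem.Chars.isalpha = true
        · have hf : ((c :: cs).filter PySem.Chars.isalpha) ≠ [] := by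
            intro h
            rw [filter_nil_iff] at h
            simp [h] at hl
          simp [hl, hf]
        · have hl' : (c :: cs).any PySem.Chars.isalpha = false := Bool.eq_false_iff.mpr hl
          have hf : ((c :: cs).filter PySem.Chars.isalpha) = [] := (filter_nil_iff _).mpr hl'
          simp [hf, hl']
      · have hu' : (decide ('_' = c) || decide ('_' ∈ cs)) = false := by
          simpa [List.contains_cons] using Bool.eq_false_iff.mpr hu
        simp [hu']

-- ===== VERDICT (by name: the statement is the Claim_ definition above) =====
theorem is_snake_case_spec : Claim_equal_is_snake_case := by
  intro query _
  exact is_snake_case_eq query
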